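-- pv_equiv track=rewrite | github.com/kojimachi2023/lyric-talk | src/token_alignment.py | _compute_offset_mapping
-- ===== SOURCE A (Python) =====
-- def _compute_offset_mapping(
--
--     text: str,
--     tokens: list[str],
-- ) -> list[tuple[int, int]]:
--     """
--     トークンのオフセットマッピングを計算する
--
--     Args:
--         text: 元のテキスト
--         tokens: トークナイズされたトークンリスト
--
--     Returns:
--         各トークンの(start, end)位置のリスト
--     """
--     offset_mapping = []
--     current_pos = 0
--
--     for token in tokens:
--         # 特殊トークン（[CLS], [SEP], [PAD]など）
--         if token.startswith("[") and token.endswith("]"):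
--             offset_mapping.append((0, 0))
--             continue
--
--         # サブワードプレフィックス（##）を除去
--         token_text = token.replace("##", "")
--
--         # トークンテキストが空の場合
--         if not token_text:
--             offset_mapping.append((current_pos, current_pos))
--             continue
--
--         # テキスト内でトークンを検索
--         # 空白を飛ばす
--         while current_pos < len(text) and text[current_pos].isspace():
--             current_pos += 1
--
--         start = current_pos
--         # トークンテキストを探す
--         found = False
--         for i in range(current_pos, len(text)):
--             # 空白を無視してマッチング
--             text_without_spaces = text[current_pos : i + 1].replace(" ", "")
--             if token_text == text_without_spaces:
--                 end = i + 1
--                 offset_mapping.append((start, end))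
--                 current_pos = end
--                 found = True
--                 break
--
--         if not found:
--             # マッチしない場合は現在位置を使用
--             offset_mapping.append((current_pos, current_pos + len(token_text)))
--             current_pos += len(token_text)
--
--     return offset_mapping
-- ===== SOURCE B (Python) =====
-- def _compute_offset_mapping(
--     text: str,
--     tokens: list[str],
-- ) -> list[tuple[int, int]]:
--     """Precompute the non-space character stream (index, char) of the text ONCE,
--     then align each token against that stream with slicing, instead of A's
--     quadratic rebuild-and-strip of text[current_pos:i+1] at every candidate end."""
--     rest = [(i, c) for i, c in enumerate(text) if c != " "]
--     out = []
--     pos = 0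
--     for token in tokens:
--         if token.startswith("[") and token.endswith("]"):
--             out.append((0, 0))
--             continue
--         token_text = token.replace("##", "")
--         m = len(token_text)
--         if m == 0:
--             out.append((pos, pos))
--             continue
--         pos += _leading_ws(text[pos:])
--         while rest and rest[0][0] < pos:
--             rest = rest[1:]
--         pre = rest[:m]
--         if len(pre) == m and "".join(c for _, c in pre) == token_text:
--             end = pre[-1][0] + 1  # pre is non-empty here (len(pre) == m >= 1)
--             out.append((pos, end))
--             pos = end
--             rest = rest[m:]
--         else:
--             out.append((pos, pos + m))
--             pos += m
--     return out
--
--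
-- def _leading_ws(s: str) -> int:
--     n = 0
--     for ch in s:
--         if not ch.isspace():
--             break
--         n += 1
--     return n
-- ===== Notes on version B (the rewrite author's own statement) =====
-- stated objective: faster
-- what changed: Replaces the quadratic inner search that rebuilds and strips the substring text[current_pos:i+1] at every candidate end position with a single precomputed non-space (index,char) stream of the text, against which each token is aligned by list slicing and one comparison.
import Mathlib
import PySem

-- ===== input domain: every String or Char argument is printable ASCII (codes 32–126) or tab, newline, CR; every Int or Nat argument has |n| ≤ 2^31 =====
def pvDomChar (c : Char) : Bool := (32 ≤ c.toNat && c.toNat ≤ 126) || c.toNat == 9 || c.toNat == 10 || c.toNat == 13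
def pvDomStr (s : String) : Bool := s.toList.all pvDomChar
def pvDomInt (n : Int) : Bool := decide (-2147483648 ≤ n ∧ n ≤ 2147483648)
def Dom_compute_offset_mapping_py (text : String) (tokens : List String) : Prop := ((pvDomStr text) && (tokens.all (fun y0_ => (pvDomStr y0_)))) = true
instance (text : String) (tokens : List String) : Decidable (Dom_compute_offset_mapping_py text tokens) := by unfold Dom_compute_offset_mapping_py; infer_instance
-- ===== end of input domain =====

-- B precomputes the text's non-space (index, char) stream once and aligns each token
-- against it by slicing, replacing A's quadratic re-slice-and-strip search (objective: faster).

-- ===== PORT A =====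

-- while current_pos < len(text) and text[current_pos].isspace(): current_pos += 1
def pvSkipA (l : List Char) (cur : Nat) : Nat :=
  if h : cur < l.length then
    if PySem.Chars.isspace l[cur] then pvSkipA l (cur + 1) else cur
  else cur
termination_by l.length - cur

-- for i in range(current_pos, len(text)):
--     if token_text == text[current_pos:i+1].replace(" ", ""): end = i+1; break
def pvSearchA (l t : List Char) (cur i : Nat) : Option Nat :=
  if _h : i < l.length then
    if t = PySem.Chars.replace (PySem.List.slice l (some (cur : Int)) (some ((i : Int) + 1))) [' '] []
    then some (i + 1)
    else pvSearchA l t cur (i + 1)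
  else none
termination_by l.length - i

-- one iteration of A's `for token in tokens` loop; state = (offset_mapping, current_pos)
def pvStepA (l : List Char) (st : List (Int × Int) × Nat) (token : String) : List (Int × Int) × Nat :=
  if PySem.Str.startswith token "[" && PySem.Str.endswith token "]" then
    (st.1 ++ [(0, 0)], st.2)
  else
    let tt := (PySem.Str.replace token "##" "").toList
    if tt = [] then (st.1 ++ [((st.2 : Int), (st.2 : Int))], st.2)
    else
      let cur := pvSkipA l st.2
      match pvSearchA l tt cur cur with
      | some e => (st.1 ++ [((cur : Int), (e : Int))], e)
      | none => (st.1 ++ [((cur : Int), (cur : Int) + tt.length)], cur + tt.length)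

def compute_offset_mapping_py (text : String) (tokens : List String) : List (Int × Int) :=
  (tokens.foldl (pvStepA text.toList) ([], 0)).1

-- ===== PORT B =====

-- def _leading_ws(s): n = 0; for ch in s: if not ch.isspace(): break; n += 1; return n
def pvLeadingWs : List Char → Nat
  | [] => 0
  | c :: t => if PySem.Chars.isspace c then pvLeadingWs t + 1 else 0

-- B's per-token recursion; rest = pending suffix of the precomputed non-space stream
def pvTokB (l : List Char) (rest : List (Int × Char)) (pos : Int) : List String → List (Int × Int)
  | [] => []
  | token :: ts =>
    if PySem.Str.startswith token "[" && PySem.Str.endswith token "]" then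
      (0, 0) :: pvTokB l rest pos ts
    else
      let tt := (PySem.Str.replace token "##" "").toList
      let m := tt.length
      if m = 0 then (pos, pos) :: pvTokB l rest pos ts
      else
        let pos' := pos + (pvLeadingWs (PySem.List.slice l (some pos) none) : Int)
        let rest' := rest.dropWhile (fun e => decide (e.1 < pos'))
        let pre := rest'.take m
        if pre.length = m ∧ pre.map Prod.snd = tt then
          -- pre[-1]: pre is non-empty in this branch (its length is m ≥ 1)
          let e := (pre.getLastD (0, ' ')).1 + 1
          (pos', e) :: pvTokB l (rest'.drop m) e ts
        else
          (pos', pos' + (m : Int)) :: pvTokB l rest' (pos' + (m : Int)) ts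

def compute_offset_mapping_py_alt (text : String) (tokens : List String) : List (Int × Int) :=
  let l := text.toList
  -- rest = [(i, c) for i, c in enumerate(text) if c != " "]
  let rest := (PySem.List.enumerate l 0).filter (fun e => e.2 != ' ')
  pvTokB l rest 0 tokens

-- ===== PRECONDITION & SPEC =====
def Spec_compute_offset_mapping_py (text : String) (tokens : List String) (out : List (Int × Int)) : Prop := out = compute_offset_mapping_py_alt text tokens
instance (text : String) (tokens : List String) (out : List (Int × Int)) : Decidable (Spec_compute_offset_mapping_py text tokens out) := by unfold Spec_compute_offset_mapping_py; infer_instance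

-- ===== CLAIM (what is proved, stated in full; the proofs are below) =====
def Claim_equal_compute_offset_mapping_py : Prop := ∀ (text : String) (tokens : List String), Dom_compute_offset_mapping_py text tokens → Spec_compute_offset_mapping_py text tokens (compute_offset_mapping_py text tokens)

-- ===== LEMMAS AND PROOFS =====

-- proof-side incremental matcher: j indexes the text, k the token; bridges A's search
-- (characterised below by search_eq_match) with B's stream comparison (matchB_strm)
def pvMatchB (l t : List Char) (j k : Nat) : Nat × Nat :=
  if h : k < t.length ∧ j < l.length then
    let c := l[j]'h.2
    if c = ' ' then pvMatchB l t (j + 1) k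
    else if c = t[k]'h.1 then pvMatchB l t (j + 1) (k + 1)
    else (j, k)
  else (j, k)
termination_by l.length - j

-- proof-side stream: pvStrm l i = the (index, char) entries of l labelled from i, spaces removed
def pvStrm : List Char → Int → List (Int × Char)
  | [], _ => []
  | c :: t, i => if c = ' ' then pvStrm t (i + 1) else (i, c) :: pvStrm t (i + 1)

theorem pvStrm_nil (i : Int) : pvStrm [] i = [] := rfl

-- `.replace(" ", "")` removes exactly the spaces
theorem replace_space_go (fuel : Nat) : ∀ (l acc : List Char), l.length ≤ fuel →
    PySem.Chars.replace.go [' '] [] fuel l acc = acc.reverse ++ l.filter (fun c => c != ' ') := by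
  induction fuel with
  | zero =>
    intro l acc h
    have hl : l = [] := List.eq_nil_of_length_eq_zero (Nat.le_zero.mp h)
    subst hl; simp [PySem.Chars.replace.go]
  | succ n ih =>
    intro l acc h
    cases l with
    | nil => simp [PySem.Chars.replace.go]
    | cons c t =>
      by_cases hc : c = ' '
      · subst hc
        have hp : List.isPrefixOf [' '] (' ' :: t) = true := by simp [List.isPrefixOf]
        simp only [PySem.Chars.replace.go, hp, if_pos]
        rw [ih _ _ (by simpa using h)]
        simp
      · have hp : List.isPrefixOf [' '] (c :: t) = false := by
          simp only [List.isPrefixOf, Bool.and_eq_false_iff, beq_eq_false_iff_ne]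
          exact Or.inl fun h => hc h.symm
        simp only [PySem.Chars.replace.go, hp]
        rw [if_neg (by simp), ih _ _ (by simpa using h)]
        simp [hc]

theorem replace_space (cs : List Char) :
    PySem.Chars.replace cs [' '] [] = cs.filter (fun c => c != ' ') := by
  simp only [PySem.Chars.replace]
  rw [if_neg (by simp), replace_space_go cs.length cs [] le_rfl]
  simp

-- the non-space characters of text[cur:j]  (proof-side abbreviation)
def pvPfx (l : List Char) (cur j : Nat) : List Char :=
  ((l.drop cur).take (j - cur)).filter (fun c => c != ' ')

theorem pvPfx_split (l : List Char) (cur j m : Nat) (h1 : cur ≤ j) (h2 : j ≤ m) :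
    pvPfx l cur m = pvPfx l cur j ++ pvPfx l j m := by
  unfold pvPfx
  rw [← List.filter_append]
  congr 1
  have hm : m - cur = (j - cur) + (m - j) := by omega
  rw [hm, List.take_add]
  congr 2
  rw [List.drop_drop]
  congr 1
  omega

theorem pvPfx_one (l : List Char) (j : Nat) (hj : j < l.length) :
    pvPfx l j (j + 1) = if l[j] = ' ' then [] else [l[j]] := by
  unfold pvPfx
  have h1 : j + 1 - j = 1 := by omega
  rw [h1, List.drop_eq_getElem_cons hj, List.take_succ_cons, List.take_zero]
  by_cases hs : l[j] = ' '
  · simp [List.filter, hs]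
  · have hb : (l[j] != ' ') = true := by simpa using hs
    simp [List.filter, hb, hs]

theorem pvPfx_snoc_space (l : List Char) (cur j : Nat) (hcj : cur ≤ j) (hj : j < l.length)
    (hs : l[j] = ' ') : pvPfx l cur (j + 1) = pvPfx l cur j := by
  rw [pvPfx_split l cur j (j + 1) hcj (by omega), pvPfx_one l j hj, if_pos hs]
  simp

theorem pvPfx_snoc_nonspace (l : List Char) (cur j : Nat) (hcj : cur ≤ j) (hj : j < l.length)
    (hs : l[j] ≠ ' ') : pvPfx l cur (j + 1) = pvPfx l cur j ++ [l[j]] := by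
  rw [pvPfx_split l cur j (j + 1) hcj (by omega), pvPfx_one l j hj, if_neg hs]

-- A's comparison at step i is against pvPfx l cur (i+1)
theorem searchA_unfold (l t : List Char) (cur i : Nat) (hi : i < l.length) :
    pvSearchA l t cur i =
      (if t = pvPfx l cur (i + 1) then some (i + 1) else pvSearchA l t cur (i + 1)) := by
  rw [pvSearchA, dif_pos hi]
  have hcast : ((i : Int) + 1) = (((i + 1 : Nat)) : Int) := by push_cast; ring
  rw [hcast, PySem.List.slice_natCast, replace_space]
  rfl

theorem take_ne_self (t : List Char) (k : Nat) (hk : k < t.length) : t ≠ t.take k := by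
  intro h
  have := congrArg List.length h
  simp at this
  omega

theorem searchA_none (l t : List Char) (cur : Nat)
    (H : ∀ m, m < l.length → t ≠ pvPfx l cur (m + 1)) :
    ∀ d i, l.length - i ≤ d → pvSearchA l t cur i = none := by
  intro d
  induction d with
  | zero =>
    intro i hd
    rw [pvSearchA, dif_neg (by omega)]
  | succ n ih =>
    intro i hd
    by_cases hi : i < l.length
    · rw [searchA_unfold l t cur i hi, if_neg (H i hi), ih (i + 1) (by omega)]
    · rw [pvSearchA, dif_neg hi]

-- the central A-side lemma: A's first-match search from j equals the incremental match,
-- under the invariant that the non-space text chars in [cur, j) spell t.take k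
theorem search_eq_match (l t : List Char) (cur : Nat) :
    ∀ d j k, l.length - j ≤ d → cur ≤ j → pvPfx l cur j = t.take k → k < t.length →
      pvSearchA l t cur j =
        (if (pvMatchB l t j k).2 = t.length then some (pvMatchB l t j k).1 else none) := by
  intro d
  induction d with
  | zero =>
    intro j k hd hcj hpfx hkt
    have hj : ¬ j < l.length := by omega
    rw [pvSearchA, dif_neg hj, pvMatchB, dif_neg (fun h => hj h.2)]
    simp [Nat.ne_of_lt hkt]
  | succ n ih =>
    intro j k hd hcj hpfx hkt
    by_cases hj : j < l.length
    · by_cases hsp : l[j] = ' '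
      · -- space in the text: A's stripped candidate is unchanged, the matcher skips
        rw [searchA_unfold l t cur j hj,
            if_neg (by rw [pvPfx_snoc_space l cur j hcj hj hsp, hpfx]; exact take_ne_self t k hkt)]
        rw [pvMatchB, dif_pos ⟨hkt, hj⟩, if_pos hsp]
        exact ih (j + 1) k (by omega) (by omega)
          (by rw [pvPfx_snoc_space l cur j hcj hj hsp]; exact hpfx) hkt
      · by_cases hck : l[j] = t[k]'hkt
        · -- matching character: both consume it
          have hsnoc : pvPfx l cur (j + 1) = t.take k ++ [t[k]'hkt] := by
            rw [pvPfx_snoc_nonspace l cur j hcj hj hsp, hpfx, hck]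
          have htake : pvPfx l cur (j + 1) = t.take (k + 1) := by
            rw [hsnoc, List.take_add_one, List.getElem?_eq_getElem hkt]
            rfl
          rw [pvMatchB, dif_pos ⟨hkt, hj⟩, if_neg hsp, if_pos hck]
          by_cases hlast : k + 1 = t.length
          · -- token fully matched: A's test succeeds, the matcher exits with k = len
            rw [searchA_unfold l t cur j hj,
                if_pos (by rw [htake, hlast, List.take_length])]
            rw [pvMatchB, dif_neg (fun h => by omega)]
            simp [hlast]
          · have hkt1 : k + 1 < t.length := by omega
            rw [searchA_unfold l t cur j hj,
                if_neg (by rw [htake]; exact take_ne_self t (k + 1) hkt1)]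
            exact ih (j + 1) (k + 1) (by omega) (by omega) htake hkt1
        · -- mismatching character: it poisons every later candidate of A; the matcher stops
          rw [pvMatchB, dif_pos ⟨hkt, hj⟩, if_neg hsp, if_neg hck]
          rw [if_neg (by simpa using Nat.ne_of_lt hkt)]
          apply searchA_none l t cur _ (l.length - j) j (by omega)
          intro m hm hEq
          by_cases hmc : m + 1 ≤ cur
          · -- candidate ends before cur: it is empty, but t is not
            have hnil : pvPfx l cur (m + 1) = [] := by
              unfold pvPfx
              have h0 : m + 1 - cur = 0 := by omega
              simp [h0]
            rw [hnil] at hEq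
            rw [hEq] at hkt
            simp at hkt
          by_cases hmj : m + 1 ≤ j
          · -- candidate ends before j: strictly shorter than t
            have hsplit := pvPfx_split l cur (m + 1) j (by omega) hmj
            have hlen : (pvPfx l cur (m + 1)).length ≤ k := by
              have := congrArg List.length hsplit
              rw [hpfx] at this
              simp at this
              omega
            rw [← hEq] at hlen
            omega
          · -- candidate ends at or after j: its (k+1)-st non-space char is l[j] ≠ t[k]
            have hjm : j ≤ m := by omega
            have h1 : pvPfx l cur (m + 1) =
                t.take k ++ (l[j] :: pvPfx l (j + 1) (m + 1)) := by
              rw [pvPfx_split l cur j (m + 1) hcj (by omega),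
                  pvPfx_split l j (j + 1) (m + 1) (by omega) (by omega),
                  pvPfx_one l j hj, if_neg hsp, hpfx]
              rfl
            have h2 : t = t.take k ++ t.drop k := (List.take_append_drop k t).symm
            have h3 : l[j] :: pvPfx l (j + 1) (m + 1) = t.drop k := by
              apply List.append_cancel_left (as := t.take k)
              rw [← h1, ← hEq, ← h2]
            rw [List.drop_eq_getElem_cons hkt] at h3
            injection h3 with h4 _
            exact hck h4
    · rw [pvSearchA, dif_neg hj, pvMatchB, dif_neg (fun h => hj h.2)]
      simp [Nat.ne_of_lt hkt]

-- A's whitespace skip is pos plus the leading-whitespace count of the rest of the text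
theorem skipA_eq (l : List Char) : ∀ d pos, l.length - pos ≤ d →
    pvSkipA l pos = pos + pvLeadingWs (l.drop pos) := by
  intro d
  induction d with
  | zero =>
    intro pos hd
    rw [pvSkipA, dif_neg (by omega), List.drop_of_length_le (by omega)]
    simp [pvLeadingWs]
  | succ n ih =>
    intro pos hd
    by_cases hp : pos < l.length
    · rw [pvSkipA, dif_pos hp, List.drop_eq_getElem_cons hp]
      by_cases hs : PySem.Chars.isspace l[pos]
      · rw [if_pos hs, ih (pos + 1) (by omega)]
        simp only [pvLeadingWs, hs, if_pos]
        omega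
      · rw [if_neg hs]
        simp [pvLeadingWs, hs]
    · rw [pvSkipA, dif_neg hp, List.drop_of_length_le (by omega)]
      simp [pvLeadingWs]

-- B's precomputed `[(i, c) for i, c in enumerate(text) if c != " "]` is pvStrm
theorem enum_filter : ∀ (l : List Char) (i : Int),
    (PySem.List.enumerate l i).filter (fun e => e.2 != ' ') = pvStrm l i := by
  intro l
  induction l with
  | nil => intro i; simp [PySem.List.enumerate_nil, pvStrm]
  | cons c t ih =>
    intro i
    rw [PySem.List.enumerate_cons]
    by_cases hc : c = ' '
    · subst hc; simp [List.filter, pvStrm, ih]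
    · have hb : (c != ' ') = true := by simpa using hc
      simp [List.filter, hb, pvStrm, hc, ih]

-- dropWhile with a bound at or below the first label drops nothing
theorem strm_dropWhile_le : ∀ (l : List Char) (i p : Int), p ≤ i →
    (pvStrm l i).dropWhile (fun e => decide (e.1 < p)) = pvStrm l i := by
  intro l
  induction l with
  | nil => intro i p _; simp [pvStrm]
  | cons c t ih =>
    intro i p hp
    by_cases hc : c = ' '
    · simp only [pvStrm, if_pos hc]
      exact ih (i + 1) p (by omega)
    · simp only [pvStrm, if_neg hc, List.dropWhile_cons]
      rw [if_neg (by simp; omega)]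

-- dropping the entries labelled below i + c exposes the stream of l.drop c
theorem strm_dropWhile : ∀ (l : List Char) (i : Int) (c : Nat),
    (pvStrm l i).dropWhile (fun e => decide (e.1 < i + (c : Int))) = pvStrm (l.drop c) (i + (c : Int)) := by
  intro l
  induction l with
  | nil => intro i c; simp [pvStrm]
  | cons ch t ih =>
    intro i c
    cases c with
    | zero =>
      simp only [Nat.cast_zero, add_zero, List.drop_zero]
      exact strm_dropWhile_le (ch :: t) i i le_rfl
    | succ c' =>
      have hcast : i + ((c' + 1 : Nat) : Int) = (i + 1) + (c' : Int) := by push_cast; ring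
      rw [hcast, List.drop_succ_cons]
      by_cases hc : ch = ' '
      · simp only [pvStrm, if_pos hc]
        exact ih (i + 1) c'
      · simp only [pvStrm, if_neg hc, List.dropWhile_cons]
        rw [if_pos (by simp; omega)]
        exact ih (i + 1) c'

-- head structure of the stream of a suffix of l
theorem strm_head (l : List Char) : ∀ d c, l.length - c ≤ d → ∀ x s',
    pvStrm (l.drop c) (c : Int) = x :: s' →
    ∃ j : Nat, c ≤ j ∧ x.1 = (j : Int) ∧ s' = pvStrm (l.drop (j + 1)) ((j + 1 : Nat) : Int) := by
  intro d
  induction d with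
  | zero =>
    intro c hd x s' hx
    rw [List.drop_of_length_le (by omega)] at hx
    simp [pvStrm] at hx
  | succ n ih =>
    intro c hd x s' hx
    by_cases hc : c < l.length
    · rw [List.drop_eq_getElem_cons hc] at hx
      by_cases hsp : l[c] = ' '
      · simp only [pvStrm, if_pos hsp] at hx
        have hcast : ((c : Int) + 1) = ((c + 1 : Nat) : Int) := by push_cast; ring
        rw [hcast] at hx
        obtain ⟨j, hj1, hj2, hj3⟩ := ih (c + 1) (by omega) x s' hx
        exact ⟨j, by omega, hj2, hj3⟩
      · simp only [pvStrm, if_neg hsp] at hx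
        have hcast : ((c : Int) + 1) = ((c + 1 : Nat) : Int) := by push_cast; ring
        rw [hcast] at hx
        refine ⟨c, le_rfl, ?_, ?_⟩
        · rw [← ((List.cons.injEq _ _ _ _).mp hx).1]
        · exact ((List.cons.injEq _ _ _ _).mp hx).2.symm
    · rw [List.drop_of_length_le (by omega)] at hx
      simp [pvStrm] at hx
  
-- getLastD of a non-empty list does not depend on the default
theorem getLastD_indep {α : Type} (l : List α) (d1 d2 : α) (h : l ≠ []) :
    l.getLastD d1 = l.getLastD d2 := by
  cases l with
  | nil => exact absurd rfl h
  | cons a t => rw [List.getLastD_cons, List.getLastD_cons]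

-- consuming the first m stream entries lands at the text position after the last of them
theorem strm_take_drop (l : List Char) : ∀ m, 1 ≤ m → ∀ c,
    ((pvStrm (l.drop c) (c : Int)).take m).length = m →
    ∃ e : Nat, (((pvStrm (l.drop c) (c : Int)).take m).getLastD (0, ' ')).1 + 1 = (e : Int) ∧
      (pvStrm (l.drop c) (c : Int)).drop m = pvStrm (l.drop e) (e : Int) := by
  intro m
  induction m with
  | zero => intro h; omega
  | succ m' ih =>
    intro _ c hlen
    cases hS : pvStrm (l.drop c) (c : Int) with
    | nil => rw [hS] at hlen; simp at hlen
    | cons x s' =>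
      rw [hS] at hlen
      obtain ⟨j, hcj, hx1, hs'⟩ := strm_head l (l.length - c) c le_rfl x s' hS
      have hlen2 : (s'.take m').length = m' := by
        rw [List.take_succ_cons] at hlen
        simpa using hlen
      cases Nat.eq_zero_or_pos m' with
      | inl hm0 =>
        subst hm0
        refine ⟨j + 1, ?_, ?_⟩
        · simp only [List.take_succ_cons, List.take_zero, List.getLastD_cons,
            List.getLastD_nil, hx1]
          push_cast; ring
        · simp only [List.drop_succ_cons, List.drop_zero]
          exact hs'
      | inr hm1 =>
        have hne : s'.take m' ≠ [] := by
          intro h0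
          rw [h0] at hlen2
          simp at hlen2
          omega
        have hlen' : ((pvStrm (l.drop (j + 1)) ((j + 1 : Nat) : Int)).take m').length = m' := by
          rw [← hs']; exact hlen2
        obtain ⟨e, he1, he2⟩ := ih hm1 (j + 1) hlen'
        refine ⟨e, ?_, ?_⟩
        · rw [List.take_succ_cons, List.getLastD_cons,
            getLastD_indep (s'.take m') x (0, ' ') hne, hs']
          exact he1
        · rw [List.drop_succ_cons, hs']
          exact he2

-- the incremental matcher succeeds iff the next non-space stream chars spell the token,
-- and then ends one past the last matched stream index
theorem matchB_strm (l tt : List Char) : ∀ d cur k, l.length - cur ≤ d → k < tt.length →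
    (if ((pvStrm (l.drop cur) (cur : Int)).take (tt.drop k).length).length = (tt.drop k).length ∧
        ((pvStrm (l.drop cur) (cur : Int)).take (tt.drop k).length).map Prod.snd = tt.drop k
     then (((pvStrm (l.drop cur) (cur : Int)).take (tt.drop k).length).getLastD (0, ' ')).1 + 1
            = ((pvMatchB l tt cur k).1 : Int) ∧ (pvMatchB l tt cur k).2 = tt.length
     else (pvMatchB l tt cur k).2 ≠ tt.length) := by
  intro d
  induction d with
  | zero =>
    intro cur k hd hk
    have hcur : ¬ cur < l.length := by omega
    rw [show l.drop cur = [] from List.drop_of_length_le (by omega)]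
    rw [if_neg]
    · rw [pvMatchB, dif_neg (fun h => hcur h.2)]
      simpa using Nat.ne_of_lt hk
    · intro hcond
      have h1 := hcond.1
      rw [pvStrm_nil] at h1
      simp at h1
      omega
  | succ n ih =>
    intro cur k hd hk
    by_cases hcur : cur < l.length
    · rw [List.drop_eq_getElem_cons hcur]
      by_cases hsp : l[cur] = ' '
      · simp only [pvStrm, if_pos hsp]
        have hcast : ((cur : Int) + 1) = ((cur + 1 : Nat) : Int) := by push_cast; ring
        rw [hcast, pvMatchB, dif_pos ⟨hk, hcur⟩, if_pos hsp]
        exact ih (cur + 1) k (by omega) hk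
      · simp only [pvStrm, if_neg hsp]
        have hdropk : tt.drop k = tt[k] :: tt.drop (k + 1) := List.drop_eq_getElem_cons hk
        rw [pvMatchB, dif_pos ⟨hk, hcur⟩, if_neg hsp]
        by_cases hck : l[cur] = tt[k]
        · rw [if_pos hck]
          by_cases hlast : k + 1 = tt.length
          · -- last token char: the matcher exits immediately with k = len
            have hdrop1 : tt.drop (k + 1) = [] := by
              rw [List.drop_of_length_le (by omega)]
            rw [hdropk, hdrop1]
            simp only [List.length_cons, List.length_nil, List.take_succ_cons, List.take_zero]
            rw [if_pos (by simp [hck])]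
            rw [pvMatchB, dif_neg (by omega)]
            refine ⟨?_, hlast⟩
            simp only [List.getLastD_cons, List.getLastD_nil]
            push_cast; ring
          · have hk1 : k + 1 < tt.length := by omega
            have hcast : ((cur : Int) + 1) = ((cur + 1 : Nat) : Int) := by push_cast; ring
            have IH := ih (cur + 1) (k + 1) (by omega) hk1
            rw [hdropk]
            simp only [List.length_cons, List.take_succ_cons]
            rw [hcast]
            by_cases hcond : ((pvStrm (l.drop (cur + 1)) ((cur + 1 : Nat) : Int)).take (tt.drop (k + 1)).length).length = (tt.drop (k + 1)).length ∧
                ((pvStrm (l.drop (cur + 1)) ((cur + 1 : Nat) : Int)).take (tt.drop (k + 1)).length).map Prod.snd = tt.drop (k + 1)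
            · have hne2 : (pvStrm (l.drop (cur + 1)) ((cur + 1 : Nat) : Int)).take (tt.drop (k + 1)).length ≠ [] := by
                intro h0
                have h1 := hcond.1
                rw [h0] at h1
                simp at h1
                omega
              rw [if_pos (And.intro (by rw [hcond.1])
                (by rw [List.map_cons, hcond.2, hck]))]
              rw [if_pos hcond] at IH
              refine ⟨?_, IH.2⟩
              rw [List.getLastD_cons,
                getLastD_indep _ (((cur : Nat) : Int), l[cur]) (0, ' ') hne2]
              exact IH.1
            · rw [if_neg hcond] at IH
              rw [if_neg]
              · exact IH
              · intro hcond'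
                apply hcond
                constructor
                · have := hcond'.1
                  simpa using this
                · have := hcond'.2
                  simp only [List.map_cons, List.cons.injEq] at this
                  exact this.2
        · -- mismatch: the matcher stops below the token length, and no stream match exists
          rw [if_neg hck]
          rw [if_neg]
          · simpa using Nat.ne_of_lt hk
          · intro hcond
            have htr : (tt.drop k).length ≥ 1 := by
              rw [List.length_drop]; omega
            have hpre : ((((cur : Int), l[cur]) :: pvStrm (l.drop (cur + 1)) ((cur : Int) + 1)).take (tt.drop k).length).map Prod.snd = tt.drop k := hcond.2
            rw [hdropk] at hpre
            simp only [List.length_cons, List.take_succ_cons, List.map_cons, List.cons.injEq] at hpre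
            exact hck hpre.1
    · rw [show l.drop cur = [] from List.drop_of_length_le (by omega)]
      rw [if_neg]
      · rw [pvMatchB, dif_neg (fun h => hcur h.2)]
        simpa using Nat.ne_of_lt hk
      · intro hcond
        have h1 := hcond.1
        rw [pvStrm_nil] at h1
        simp at h1
        omega

-- the main loop correspondence: A's fold state (acc, pos) vs B's (stream suffix, pos)
theorem main_loop (l : List Char) : ∀ (tokens : List String) (acc : List (Int × Int)) (q pos : Nat),
    q ≤ pos →
    (List.foldl (pvStepA l) (acc, pos) tokens).1
      = acc ++ pvTokB l (pvStrm (l.drop q) (q : Int)) ((pos : Nat) : Int) tokens := by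
  intro tokens
  induction tokens with
  | nil => intro acc q pos _; simp [pvTokB]
  | cons token ts ih =>
    intro acc q pos hqp
    rw [List.foldl_cons]
    by_cases hspec : (PySem.Str.startswith token "[" && PySem.Str.endswith token "]") = true
    · rw [pvTokB, if_pos hspec]
      show (List.foldl (pvStepA l) (pvStepA l (acc, pos) token) ts).1 = _
      rw [pvStepA, if_pos hspec]
      rw [ih (acc ++ [(0, 0)]) q pos hqp]
      simp
    · rw [pvTokB, if_neg hspec]
      show (List.foldl (pvStepA l) (pvStepA l (acc, pos) token) ts).1 = _
      rw [pvStepA, if_neg hspec]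
      set tt := (PySem.Str.replace token "##" "").toList with htt
      by_cases hempty : tt = []
      · rw [if_pos hempty, if_pos (by rw [hempty]; rfl)]
        rw [ih (acc ++ [((pos : Int), (pos : Int))]) q pos hqp]
        simp
      · have hm : ¬ tt.length = 0 := by simpa using hempty
        rw [if_neg hempty, if_neg hm]
        -- B's skip equals A's skip
        have hslice : PySem.List.slice l (some ((pos : Nat) : Int)) none = l.drop pos := by
          rw [PySem.List.slice_from] <;> simp
        have hskip : ((pos : Nat) : Int) + (pvLeadingWs (PySem.List.slice l (some ((pos : Nat) : Int)) none) : Int)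
            = ((pvSkipA l pos : Nat) : Int) := by
          rw [hslice, skipA_eq l (l.length - pos) pos le_rfl]
          push_cast; ring
        set cur := pvSkipA l pos with hcur
        have hposcur : pos ≤ cur := by
          rw [hcur, skipA_eq l (l.length - pos) pos le_rfl]; omega
        -- B's dropWhile exposes the stream of l.drop cur
        have hrest : (pvStrm (l.drop q) (q : Int)).dropWhile (fun e => decide (e.1 < ((cur : Nat) : Int)))
            = pvStrm (l.drop cur) ((cur : Nat) : Int) := by
          have hc : (q : Int) + ((cur - q : Nat) : Int) = ((cur : Nat) : Int) := by
            omega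
          have h2 : q + (cur - q) = cur := by omega
          have hd := strm_dropWhile (l.drop q) (q : Int) (cur - q)
          rw [List.drop_drop, h2] at hd
          simp only [hc] at hd
          exact hd
        -- characterise A's search via the incremental matcher and the stream
        set M := pvMatchB l tt cur 0 with hM
        have hsearch : pvSearchA l tt cur cur = if M.2 = tt.length then some M.1 else none := by
          apply search_eq_match l tt cur (l.length - cur) cur 0 le_rfl le_rfl
          · unfold pvPfx; simp
          · omega
        have hstream := matchB_strm l tt (l.length - cur) cur 0 le_rfl (by omega)
        rw [List.drop_zero] at hstream
        simp only [hskip, hrest]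
        by_cases hcond : ((pvStrm (l.drop cur) ((cur : Nat) : Int)).take tt.length).length = tt.length ∧
            ((pvStrm (l.drop cur) ((cur : Nat) : Int)).take tt.length).map Prod.snd = tt
        · rw [if_pos hcond] at hstream
          have hA : pvSearchA l tt cur cur = some M.1 := by
            rw [hsearch, if_pos hstream.2]
          simp only [hA]
          rw [if_pos hcond, hstream.1]
          obtain ⟨e', he1, he2⟩ := strm_take_drop l tt.length (by omega) cur hcond.1
          have hee : e' = M.1 := by
            have hmix : ((e' : Nat) : Int) = ((M.1 : Nat) : Int) := by rw [← he1, hstream.1]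
            exact_mod_cast hmix
          rw [he2, hee]
          rw [ih ((acc, pos).1 ++ [(((cur : Nat) : Int), ((M.1 : Nat) : Int))]) M.1 M.1 le_rfl]
          simp [← hM]
        · rw [if_neg hcond] at hstream
          have hA : pvSearchA l tt cur cur = none := by
            rw [hsearch, if_neg (by simpa using hstream)]
          simp only [hA]
          rw [if_neg hcond]
          have hcast : ((cur : Nat) : Int) + (tt.length : Int) = ((cur + tt.length : Nat) : Int) := by
            push_cast; ring
          rw [hcast]
          rw [ih ((acc, pos).1 ++ [(((cur : Nat) : Int), ((cur + tt.length : Nat) : Int))]) cur (cur + tt.length) (by omega)]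
          simp

-- ===== VERDICT (by name: the statement is the Claim_ definition above) =====
theorem compute_offset_mapping_py_spec : Claim_equal_compute_offset_mapping_py := by
  intro text tokens _
  unfold Spec_compute_offset_mapping_py compute_offset_mapping_py compute_offset_mapping_py_alt
  simp only [enum_filter]
  have h := main_loop text.toList tokens [] 0 0 le_rfl
  rw [List.drop_zero] at h
  simpa using h
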